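-- pv_equiv track=rewrite | github.com/griffinhiggins/100AlgorithmsChallenge | ToDo/matrixElementsSum/matrixElementsSum.py | matrixElementsSum
-- ===== SOURCE A (Python) =====
-- def matrixElementsSum(arr):
--     sum = 0
--     length = len(arr) - 1
--     for i,x in enumerate(arr):
--         for j,y in enumerate(x):
--             if i < length:
--                 if arr[i+1][j] == 0:
--                     continue
--             sum += y
--     return sum
-- ===== SOURCE B (Python) =====
-- def matrixElementsSum(arr):
--     total = sum(sum(row) for row in arr)
--     for prev, cur in zip(arr, arr[1:]):
--         for j, v in enumerate(cur):
--             if v == 0 and j < len(prev):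
--                 total -= prev[j]
--     return total
-- ===== Notes on version B (the rewrite author's own statement) =====
-- stated objective: alternative
-- what changed: A makes one guarded pass skipping each cell whose below-neighbour is zero via global index lookups arr[i+1][j]; B instead sums the whole matrix in one pass and then, walking adjacent row pairs zip(arr, arr[1:]), subtracts each cell sitting directly above a zero.
import Mathlib
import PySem

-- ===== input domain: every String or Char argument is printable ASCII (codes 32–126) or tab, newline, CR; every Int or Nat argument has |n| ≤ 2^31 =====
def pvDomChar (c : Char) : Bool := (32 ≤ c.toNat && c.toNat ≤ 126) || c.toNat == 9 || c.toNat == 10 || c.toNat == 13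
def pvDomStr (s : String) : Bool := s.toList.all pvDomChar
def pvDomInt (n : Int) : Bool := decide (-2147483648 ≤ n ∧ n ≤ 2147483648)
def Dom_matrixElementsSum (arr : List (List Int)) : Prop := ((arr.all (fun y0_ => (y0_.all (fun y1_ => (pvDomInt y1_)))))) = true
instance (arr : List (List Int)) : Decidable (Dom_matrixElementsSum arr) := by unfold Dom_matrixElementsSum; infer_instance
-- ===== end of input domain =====

-- B sums the whole matrix once and then subtracts, over adjacent row pairs, each cell lying
-- directly above a zero — a different decomposition of A's skip rule (objective: alternative).

-- ===== PORT A =====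
def matrixElementsSum (arr : List (List Int)) : Int :=
  -- sum = 0; length = len(arr) - 1; nested enumerate loops; arr[i+1][j] via pyGetD
  -- (pyGetD is exact under Pre_, which excludes exactly the IndexError inputs)
  let length : Int := (arr.length : Int) - 1
  (PySem.List.enumerate arr 0).foldl (fun sum ix =>
    (PySem.List.enumerate ix.2 0).foldl (fun sum jy =>
      if ix.1 < length then
        if PySem.List.pyGetD (PySem.List.pyGetD arr (ix.1 + 1) []) jy.1 0 = 0 then sum
        else sum + jy.2
      else sum + jy.2) sum) 0

-- ===== PORT B =====
def matrixElementsSum_alt (arr : List (List Int)) : Int :=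
  -- total = sum(sum(row) for row in arr); then for prev, cur in zip(arr, arr[1:]): …
  let total : Int := arr.foldl (fun acc row => acc + row.foldl (fun a v => a + v) 0) 0
  (arr.zip (PySem.List.slice arr (some 1) none)).foldl (fun total pc =>
    (PySem.List.enumerate pc.2 0).foldl (fun total jv =>
      if jv.2 = 0 ∧ jv.1 < (pc.1.length : Int) then total - PySem.List.pyGetD pc.1 jv.1 0
      else total) total) total

-- ===== PRECONDITION & SPEC =====
-- Pre_ excludes exactly the inputs on which A raises IndexError: some row strictly longer
-- than the row below it (then arr[i+1][j] is out of range).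
def Pre_matrixElementsSum (arr : List (List Int)) : Prop :=
  ∀ p ∈ arr.zip arr.tail, p.1.length ≤ p.2.length
instance (arr : List (List Int)) : Decidable (Pre_matrixElementsSum arr) := by
  unfold Pre_matrixElementsSum; infer_instance
def pvWitness_matrixElementsSum : List (List Int) := [[1, 2], [0, 3], [4, 0]]

def Spec_matrixElementsSum (arr : List (List Int)) (out : Int) : Prop := out = matrixElementsSum_alt arr
instance (arr : List (List Int)) (out : Int) : Decidable (Spec_matrixElementsSum arr out) := by unfold Spec_matrixElementsSum; infer_instance

-- ===== CLAIM (what is proved, stated in full; the proofs are below) =====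
def Claim_equal_matrixElementsSum : Prop := ∀ (arr : List (List Int)), Dom_matrixElementsSum arr → Pre_matrixElementsSum arr → Spec_matrixElementsSum arr (matrixElementsSum arr)

-- ===== LEMMAS AND PROOFS =====

-- cells of `p` lying above a zero of `c`
def pairSub (p c : List Int) : Int :=
  ((p.zip c).map (fun vb => if vb.2 = 0 then vb.1 else 0)).sum
-- cells of `p` kept by A's rule against next row `c`
def pairKeep (p c : List Int) : Int :=
  ((p.zip c).map (fun vb => if vb.2 = 0 then 0 else vb.1)).sum

def rowKeep (x : List Int) (rest : List (List Int)) : Int :=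
  match rest with
  | [] => x.sum
  | nxt :: _ => pairKeep x nxt

def sumA : List (List Int) → Int
  | [] => 0
  | x :: rest => rowKeep x rest + sumA rest

def Abody (arr : List (List Int)) (length : Int) : Int → Int × List Int → Int :=
  fun sum ix =>
    (PySem.List.enumerate ix.2 0).foldl (fun sum jy =>
      if ix.1 < length then
        if PySem.List.pyGetD (PySem.List.pyGetD arr (ix.1 + 1) []) jy.1 0 = 0 then sum
        else sum + jy.2
      else sum + jy.2) sum

theorem A_unfold (arr : List (List Int)) :
    matrixElementsSum arr
      = (PySem.List.enumerate arr 0).foldl (Abody arr ((arr.length : Int) - 1)) 0 := rfl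

theorem pairKeep_add_pairSub (x : List Int) :
    ∀ (nxt : List Int), x.length ≤ nxt.length → pairKeep x nxt + pairSub x nxt = x.sum := by
  induction x with
  | nil => intro nxt _; simp [pairKeep, pairSub]
  | cons y ys ih =>
    intro nxt h
    cases nxt with
    | nil => simp at h
    | cons b bs =>
      simp only [pairKeep, pairSub, List.zip_cons_cons, List.map_cons, List.sum_cons,
        List.sum_cons] at *
      have := ih bs (by simpa using h)
      by_cases hb : b = 0 <;> simp [hb] <;>
        simp only [pairKeep, pairSub] at this <;> omega

-- inner loop of A, keep branch (row x, next row nxt), generalized start index t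
theorem innerA_keep_gen (x : List Int) :
    ∀ (nxt : List Int) (t : Nat) (s : Int), x.length + t ≤ nxt.length →
    (PySem.List.enumerate x (t : Int)).foldl
        (fun sum jy => if PySem.List.pyGetD nxt jy.1 0 = 0 then sum else sum + jy.2) s
      = s + pairKeep x (nxt.drop t) := by
  induction x with
  | nil => intro nxt t s _; simp [pairKeep, PySem.List.enumerate_nil]
  | cons y ys ih =>
    intro nxt t s h
    have ht : t < nxt.length := by simp at h; omega
    have hdrop : nxt.drop t = nxt[t] :: nxt.drop (t + 1) := List.drop_eq_getElem_cons ht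
    have hget : PySem.List.pyGetD nxt (t : Int) 0 = nxt[t] := by
      rw [PySem.List.pyGetD_natCast, List.getD_eq_getElem?_getD, List.getElem?_eq_getElem ht]
      rfl
    have hcast : (t : Int) + 1 = ((t + 1 : Nat) : Int) := by push_cast; ring
    have hlen : ys.length + (t + 1) ≤ nxt.length := by simp at h; omega
    rw [PySem.List.enumerate_cons, List.foldl_cons]
    simp only [hget]
    rw [hdrop]
    simp only [pairKeep, List.zip_cons_cons, List.map_cons, List.sum_cons]
    by_cases hz : nxt[t] = 0
    · rw [if_pos hz, hcast, ih nxt (t + 1) s hlen]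
      simp [pairKeep, hz]
    · rw [if_neg hz, hcast, ih nxt (t + 1) (s + y) hlen]
      simp only [pairKeep, if_neg hz]
      omega

-- inner loop of A in the last row: plain summation
theorem innerA_sum (x : List Int) :
    ∀ (t : Nat) (s : Int),
    (PySem.List.enumerate x (t : Int)).foldl (fun sum jy => sum + jy.2) s = s + x.sum := by
  induction x with
  | nil => intro t s; simp [PySem.List.enumerate_nil]
  | cons y ys ih =>
    intro t s
    rw [PySem.List.enumerate_cons, List.foldl_cons]
    have hcast : (t : Int) + 1 = ((t + 1 : Nat) : Int) := by push_cast; ring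
    rw [hcast, ih (t + 1) (s + y)]
    simp; omega

-- A's loop over the rows from position k
theorem pre_tail (x : List Int) (rest : List (List Int)) :
    Pre_matrixElementsSum (x :: rest) → Pre_matrixElementsSum rest := by
  intro h p hp
  cases rest with
  | nil => simp at hp
  | cons nxt rs =>
    apply h
    simp only [List.tail_cons, List.zip_cons_cons]
    simp only [List.tail_cons] at hp
    exact List.mem_cons_of_mem _ hp

theorem pre_head (x nxt : List Int) (rs : List (List Int)) :
    Pre_matrixElementsSum (x :: nxt :: rs) → x.length ≤ nxt.length := by
  intro h; exact h (x, nxt) (by simp)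

-- A's loop over the rows from position k
theorem A_loop (arr : List (List Int)) :
    ∀ (rows : List (List Int)) (k : Nat) (s : Int),
    rows = arr.drop k →
    Pre_matrixElementsSum rows →
    (PySem.List.enumerate rows (k : Int)).foldl (Abody arr ((arr.length : Int) - 1)) s
      = s + sumA rows := by
  intro rows
  induction rows with
  | nil => intro k s _ _; simp [PySem.List.enumerate_nil, sumA]
  | cons x rest ih =>
    intro k s hdrop hch
    have hk : k < arr.length := by
      by_contra hk
      rw [List.drop_eq_nil_of_le (by omega)] at hdrop
      simp at hdrop
    have hrest : rest = arr.drop (k + 1) := by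
      have := congrArg List.tail hdrop
      simpa [List.tail_drop] using this
    rw [PySem.List.enumerate_cons, List.foldl_cons]
    have hcast : (k : Int) + 1 = ((k + 1 : Nat) : Int) := by push_cast; ring
    have hbody : Abody arr ((arr.length : Int) - 1) s ((k : Int), x) = s + rowKeep x rest := by
      unfold Abody
      cases rest with
      | nil =>
        have hnil : arr.drop (k + 1) = [] := hrest.symm
        have hlen := List.drop_eq_nil_iff.mp hnil
        have hlast : ¬ ((k : Int) < (arr.length : Int) - 1) := by omega
        simp only [if_neg hlast]
        simpa [rowKeep] using innerA_sum x 0 s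
      | cons nxt rest' =>
        have hk1 : k + 1 < arr.length := by
          by_contra hnk
          have hnil : arr.drop (k + 1) = [] := List.drop_eq_nil_of_le (by omega)
          rw [← hrest] at hnil
          simp at hnil
        have hlt : (k : Int) < (arr.length : Int) - 1 := by omega
        have hnxt : PySem.List.pyGetD arr ((k : Int) + 1) [] = nxt := by
          rw [hcast, PySem.List.pyGetD_natCast, List.getD_eq_getElem?_getD]
          rw [← List.head?_drop, ← hrest]
          rfl
        have hlen : x.length ≤ nxt.length := pre_head x nxt rest' hch
        simp only [if_pos hlt, hnxt]
        have := innerA_keep_gen x nxt 0 s (by omega)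
        simpa [rowKeep] using this
    rw [hbody, hcast, ih (k + 1) (s + rowKeep x rest) hrest (pre_tail x rest hch)]
    simp [sumA]; omega

-- inner loop of B (current row cur, previous row prev), generalized start index t
theorem innerB_gen (cur : List Int) (prev : List Int) :
    ∀ (t : Nat) (s : Int),
    (PySem.List.enumerate cur (t : Int)).foldl
        (fun total jv => if jv.2 = 0 ∧ jv.1 < (prev.length : Int) then
            total - PySem.List.pyGetD prev jv.1 0 else total) s
      = s - pairSub (prev.drop t) cur := by
  induction cur with
  | nil => intro t s; simp [pairSub, PySem.List.enumerate_nil]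
  | cons v vs ih =>
    intro t s
    rw [PySem.List.enumerate_cons, List.foldl_cons]
    have hcast : (t : Int) + 1 = ((t + 1 : Nat) : Int) := by push_cast; ring
    by_cases ht : t < prev.length
    · have hdrop : prev.drop t = prev[t] :: prev.drop (t + 1) := List.drop_eq_getElem_cons ht
      have hget : PySem.List.pyGetD prev (t : Int) 0 = prev[t] := by
        rw [PySem.List.pyGetD_natCast, List.getD_eq_getElem?_getD, List.getElem?_eq_getElem ht]
        rfl
      have htI : (t : Int) < (prev.length : Int) := by exact_mod_cast ht
      simp only [hget]
      rw [hdrop]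
      simp only [pairSub, List.zip_cons_cons, List.map_cons, List.sum_cons]
      by_cases hz : v = 0
      · rw [if_pos ⟨hz, htI⟩, hcast, ih (t + 1) (s - prev[t])]
        simp only [pairSub, hz, reduceIte]
        omega
      · rw [if_neg (by intro hc; exact hz hc.1), hcast, ih (t + 1) s]
        simp only [pairSub, if_neg hz]
        omega
    · have htI : ¬ ((t : Int) < (prev.length : Int)) := by
        intro hc
        exact ht (by exact_mod_cast hc)
      have hdrop : prev.drop t = [] := List.drop_eq_nil_of_le (by omega)
      have hdrop1 : prev.drop (t + 1) = [] := List.drop_eq_nil_of_le (by omega)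
      rw [if_neg (by intro hc; exact htI hc.2), hcast, ih (t + 1) s]
      simp [pairSub, hdrop, hdrop1]

-- B's outer loop over adjacent row pairs
theorem B_loop (l : List (List Int × List Int)) :
    ∀ (s : Int),
    l.foldl (fun total pc =>
      (PySem.List.enumerate pc.2 0).foldl (fun total jv =>
        if jv.2 = 0 ∧ jv.1 < (pc.1.length : Int) then total - PySem.List.pyGetD pc.1 jv.1 0
        else total) total) s
      = s - (l.map (fun pc => pairSub pc.1 pc.2)).sum := by
  induction l with
  | nil => intro s; simp
  | cons pc rest ih =>
    intro s
    rw [List.foldl_cons]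
    have h0 := innerB_gen pc.2 pc.1 0 s
    simp only [Nat.cast_zero, List.drop_zero] at h0
    rw [h0, ih]
    simp only [List.map_cons, List.sum_cons]
    omega

theorem B_total (arr : List (List Int)) :
    arr.foldl (fun acc row => acc + row.foldl (fun a v => a + v) 0) 0
      = (arr.map List.sum).sum := by
  have h : ∀ (row : List Int) (a : Int), row.foldl (fun a v => a + v) a = a + row.sum := by
    intro row
    induction row with
    | nil => intro a; simp
    | cons v vs ih => intro a; rw [List.foldl_cons, ih]; simp; omega
  have h2 : ∀ (l : List (List Int)) (a : Int),
      l.foldl (fun acc row => acc + row.foldl (fun a v => a + v) 0) a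
        = a + (l.map List.sum).sum := by
    intro l
    induction l with
    | nil => intro a; simp
    | cons r rs ih =>
      intro a
      rw [List.foldl_cons, h r 0, ih]
      simp only [List.map_cons, List.sum_cons]
      omega
  simpa using h2 arr 0

theorem B_unfold (arr : List (List Int)) :
    matrixElementsSum_alt arr
      = (arr.map List.sum).sum
        - ((arr.zip arr.tail).map (fun pc => pairSub pc.1 pc.2)).sum := by
  unfold matrixElementsSum_alt
  rw [PySem.List.slice_from_one, B_loop, B_total]

theorem sumA_eq (arr : List (List Int)) :
    Pre_matrixElementsSum arr →
    sumA arr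
      = (arr.map List.sum).sum
        - ((arr.zip arr.tail).map (fun pc => pairSub pc.1 pc.2)).sum := by
  induction arr with
  | nil => intro _; simp [sumA]
  | cons x rest ih =>
    intro hch
    cases rest with
    | nil => simp [sumA, rowKeep]
    | cons nxt rest' =>
      have hlen : x.length ≤ nxt.length := pre_head x nxt rest' hch
      have hkeep := pairKeep_add_pairSub x nxt hlen
      have := ih (pre_tail x (nxt :: rest') hch)
      simp only [sumA, rowKeep, List.map_cons, List.sum_cons, List.tail_cons,
        List.zip_cons_cons] at *
      omega

-- ===== VERDICT (by name: the statement is the Claim_ definition above) =====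
theorem matrixElementsSum_spec : Claim_equal_matrixElementsSum := by
  intro arr _ hpre
  unfold Spec_matrixElementsSum
  have h0 := A_loop arr arr 0 0 (by simp) hpre
  simp only [Nat.cast_zero] at h0
  rw [A_unfold, h0, B_unfold, ← sumA_eq arr hpre]
  omega
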